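-- pv_equiv track=rewrite | github.com/nelsonlan01/circle_arithmetic | circle.py | minus_api
-- ===== SOURCE A (Python) =====
-- def minus_api(m, n):
--     total = 0
--     i = 0
--     while i < n:
--         if i == 0:
--             total = m
--         elif i != 0:
--             total = total - (m - i)
--         i += 1
--     return total
-- ===== SOURCE B (Python) =====
-- def minus_api(m, n):
--     # Closed form: for n >= 1 the loop computes m - sum_{i=1}^{n-1} (m - i)
--     # = m*(2 - n) + n*(n - 1)//2; for n <= 0 the loop never runs.
--     if n <= 0:
--         return 0
--     return m * (2 - n) + n * (n - 1) // 2
-- ===== Notes on version B (the rewrite author's own statement) =====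
-- stated objective: faster
-- what changed: Replaced the O(n) accumulation loop by the closed-form arithmetic-series formula m*(2-n) + n*(n-1)//2 (0 when n <= 0).
import Mathlib
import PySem

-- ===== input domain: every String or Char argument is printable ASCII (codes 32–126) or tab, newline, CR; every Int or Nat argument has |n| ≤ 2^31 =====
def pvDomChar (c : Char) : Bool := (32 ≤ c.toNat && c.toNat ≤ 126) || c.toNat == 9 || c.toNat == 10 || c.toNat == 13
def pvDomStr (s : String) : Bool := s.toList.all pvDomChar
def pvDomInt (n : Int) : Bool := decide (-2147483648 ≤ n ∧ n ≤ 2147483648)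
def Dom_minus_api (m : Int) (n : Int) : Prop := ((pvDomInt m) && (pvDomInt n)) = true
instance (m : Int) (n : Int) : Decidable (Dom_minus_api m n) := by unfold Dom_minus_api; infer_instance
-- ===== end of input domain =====

-- B replaces A's O(n) accumulation loop by the closed-form arithmetic-series formula (objective: faster).

-- ===== PORT A =====
-- A's while loop over i = 0..n-1 ported as a fold over pyRange, same branch order.
def minus_api (m : Int) (n : Int) : Int :=
  (PySem.List.pyRange 0 n 1).foldl
    (fun total i => if i = 0 then m else if i ≠ 0 then total - (m - i) else total) 0

-- ===== PORT B =====
def minus_api_alt (m : Int) (n : Int) : Int :=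
  if n ≤ 0 then 0 else m * (2 - n) + PySem.Int.floordiv (n * (n - 1)) 2

-- ===== PRECONDITION & SPEC =====
def Spec_minus_api (m : Int) (n : Int) (out : Int) : Prop := out = minus_api_alt m n
instance (m : Int) (n : Int) (out : Int) : Decidable (Spec_minus_api m n out) := by unfold Spec_minus_api; infer_instance

-- ===== CLAIM (what is proved, stated in full; the proofs are below) =====
def Claim_equal_minus_api : Prop := ∀ (m : Int) (n : Int), Dom_minus_api m n → Spec_minus_api m n (minus_api m n)

-- ===== LEMMAS AND PROOFS =====

-- the loop body equals the closed form for every positive bound, by induction on the bound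
theorem minus_api_loop (m : Int) : ∀ (N : ℕ),
    (PySem.List.pyRange 0 ((N : Int) + 1) 1).foldl
      (fun total i => if i = 0 then m else if i ≠ 0 then total - (m - i) else total) 0
      = 2 * m - ((N : Int) + 1) * m + (N : Int) * ((N : Int) + 1) / 2 := by
  intro N
  induction N with
  | zero =>
    rw [PySem.List.pyRange_one_cons (by norm_num)]
    norm_num [PySem.List.pyRange_one_eq_nil]
    ring
  | succ k ih =>
    push_cast
    rw [PySem.List.pyRange_one_succ_right (by positivity), List.foldl_append]
    push_cast at ih
    rw [ih]
    have hk : ((k : Int) + 1) ≠ 0 := by positivity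
    simp only [List.foldl, if_neg hk, if_pos hk]
    have h2 : ((k : Int) + 1) * ((k : Int) + 1 + 1) / 2 = (k : Int) * ((k : Int) + 1) / 2 + ((k : Int) + 1) := by
      have he : ((k : Int) + 1) * ((k : Int) + 1 + 1) = (k : Int) * ((k : Int) + 1) + ((k : Int) + 1) * 2 := by ring
      rw [he, Int.add_mul_ediv_right _ _ (by norm_num)]
    rw [h2]; ring

-- ===== VERDICT (by name: the statement is the Claim_ definition above) =====
theorem minus_api_spec : Claim_equal_minus_api := by
  intro m n _
  unfold Spec_minus_api minus_api minus_api_alt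
  by_cases hn : n ≤ 0
  · rw [PySem.List.pyRange_one_eq_nil hn]
    simp [hn]
  · push Not at hn
    obtain ⟨N, hN⟩ : ∃ N : ℕ, n = (N : Int) + 1 := ⟨(n - 1).toNat, by omega⟩
    subst hN
    rw [if_neg (by omega)]
    rw [PySem.Int.floordiv_eq_ediv_of_pos (by norm_num)]
    rw [minus_api_loop]
    have : ((N : Int) + 1) * ((N : Int) + 1 - 1) = (N : Int) * ((N : Int) + 1) := by ring
    rw [this]; ring
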